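-- pv_equiv track=rewrite | github.com/StefanHeng/ProgGen | src/generate/step_wise/util.py | get_diff_spans
-- ===== SOURCE A (Python) =====
-- from typing import List, Tuple, Dict, Union, Iterable, Any, Optional, Callable
--
-- def get_diff_spans(str1: str, str2: str) -> List[Tuple[str, ...]]:
--     """
--     :return: List of consecutive spans where `str1` and `str2` differ
--     """
--     ret = []
--     diff = ['', '']
--     for c1, c2 in zip(str1, str2):
--         if c1 != c2:
--             diff[0] += c1
--             diff[1] += c2
--         else:
--             if diff[0]:
--                 ret.append(tuple(diff))
--                 diff = ['', '']
--     if diff[0]: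
--         ret.append(tuple(diff))
--     return ret
-- ===== SOURCE B (Python) =====
-- def get_diff_spans(str1, str2):
--     """Run-extraction over the zipped pair list: jump over equal stretches,
--     then take each maximal differing run as one span."""
--     pairs = list(zip(str1, str2))
--     n = len(pairs)
--     res = []
--     i = 0
--     while i < n:
--         if pairs[i][0] == pairs[i][1]:
--             i += 1
--         else:
--             j = i
--             while j < n and pairs[j][0] != pairs[j][1]:
--                 j += 1
--             res.append((''.join(a for a, _ in pairs[i:j]),
--                         ''.join(b for _, b in pairs[i:j])))
--             i = j
--     return res
-- ===== Notes on version B (the rewrite author's own statement) =====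
-- stated objective: alternative
-- what changed: A's char-at-a-time accumulator state machine (grow diff buffers, flush on an equal char) is replaced by run extraction over the zipped pair list: skip equal pairs, take each maximal differing run with takeWhile/dropWhile-style span jumps and emit its two strings at once.
import Mathlib
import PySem

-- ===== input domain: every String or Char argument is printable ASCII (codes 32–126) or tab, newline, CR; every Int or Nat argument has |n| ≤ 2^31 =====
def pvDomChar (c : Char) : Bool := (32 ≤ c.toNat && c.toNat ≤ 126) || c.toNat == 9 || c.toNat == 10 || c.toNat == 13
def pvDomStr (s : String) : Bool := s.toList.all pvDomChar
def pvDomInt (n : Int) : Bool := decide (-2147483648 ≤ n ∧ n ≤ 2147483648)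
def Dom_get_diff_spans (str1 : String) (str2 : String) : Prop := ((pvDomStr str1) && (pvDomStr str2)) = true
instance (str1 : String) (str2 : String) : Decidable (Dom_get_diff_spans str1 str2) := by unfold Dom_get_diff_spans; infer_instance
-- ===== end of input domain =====

-- B replaces A's char-at-a-time accumulator state machine by run extraction over the
-- zipped pair list (takeWhile/dropWhile spans); alternative decomposition, same O(n) cost.


-- ===== PORT A =====
-- A's loop state: (ret, diff[0], diff[1]); the growing Python strings are carried as
-- List Char (exact: Lean's String concat is opaque to the kernel), turned into String on flush.
def pvAStep (s : List (List String) × List Char × List Char) (p : Char × Char) :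
    List (List String) × List Char × List Char :=
  if p.1 != p.2 then (s.1, s.2.1 ++ [p.1], s.2.2 ++ [p.2])
  else if s.2.1.isEmpty then s else (s.1 ++ [[String.ofList s.2.1, String.ofList s.2.2]], [], [])

def get_diff_spans (str1 : String) (str2 : String) : List (List String) :=
  let s := (List.zip str1.toList str2.toList).foldl pvAStep ([], [], [])
  if s.2.1.isEmpty then s.1 else s.1 ++ [[String.ofList s.2.1, String.ofList s.2.2]]

-- ===== PORT B =====
-- Source B's outer while: skip an equal pair, else take the maximal differing run as one span.
def pvSpansB : List (Char × Char) → List (List String)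
  | [] => []
  | p :: ps =>
    if p.1 == p.2 then pvSpansB ps
    else
      let run := List.takeWhile (fun q => q.1 != q.2) (p :: ps)
      [String.ofList (run.map Prod.fst), String.ofList (run.map Prod.snd)] ::
        pvSpansB (List.dropWhile (fun q => q.1 != q.2) (p :: ps))
  termination_by ps => ps.length
  decreasing_by
    · simp
    · rename_i h
      simp only [List.dropWhile_cons]
      simp only [show ((fun q : Char × Char => q.1 != q.2) p) = true by simpa using h]
      exact Nat.lt_succ_of_le (List.length_dropWhile_le _ _)

def get_diff_spans_alt (str1 : String) (str2 : String) : List (List String) :=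
  pvSpansB (List.zip str1.toList str2.toList)

-- ===== PRECONDITION & SPEC =====
def Spec_get_diff_spans (str1 : String) (str2 : String) (out : List (List String)) : Prop := out = get_diff_spans_alt str1 str2
instance (str1 : String) (str2 : String) (out : List (List String)) : Decidable (Spec_get_diff_spans str1 str2 out) := by unfold Spec_get_diff_spans; infer_instance

-- ===== CLAIM (what is proved, stated in full; the proofs are below) =====
def Claim_equal_get_diff_spans : Prop := ∀ (str1 : String) (str2 : String), Dom_get_diff_spans str1 str2 → Spec_get_diff_spans str1 str2 (get_diff_spans str1 str2)

-- ===== LEMMAS AND PROOFS =====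

-- A's machine with pending run (d0, d1), written as structural recursion
def pvSpansA (d0 d1 : List Char) : List (Char × Char) → List (List String)
  | [] => if d0.isEmpty then [] else [[String.ofList d0, String.ofList d1]]
  | p :: ps =>
    if p.1 != p.2 then pvSpansA (d0 ++ [p.1]) (d1 ++ [p.2]) ps
    else if d0.isEmpty then pvSpansA [] [] ps
    else [String.ofList d0, String.ofList d1] :: pvSpansA [] [] ps

def pvFinish (s : List (List String) × List Char × List Char) : List (List String) :=
  if s.2.1.isEmpty then s.1 else s.1 ++ [[String.ofList s.2.1, String.ofList s.2.2]]

lemma pvFoldl_eq_spansA (ps : List (Char × Char)) :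
    ∀ (ret : List (List String)) (d0 d1 : List Char), (d0 = [] ↔ d1 = []) →
      pvFinish (ps.foldl pvAStep (ret, d0, d1)) = ret ++ pvSpansA d0 d1 ps := by
  induction ps with
  | nil => intro ret d0 d1 _; by_cases h : d0.isEmpty <;> simp [pvFinish, pvSpansA, h]
  | cons p ps ih =>
    intro ret d0 d1 hiff
    by_cases hne : (p.1 != p.2) = true
    · rw [List.foldl_cons,
        show pvAStep (ret, d0, d1) p = (ret, d0 ++ [p.1], d1 ++ [p.2]) by
          simp [pvAStep, hne],
        show pvSpansA d0 d1 (p :: ps) = pvSpansA (d0 ++ [p.1]) (d1 ++ [p.2]) ps by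
          simp [pvSpansA, hne]]
      exact ih _ _ _ (by simp)
    · by_cases he : d0.isEmpty
      · have hd0 : d0 = [] := by simpa [List.isEmpty_iff] using he
        have hd1 : d1 = [] := hiff.mp hd0
        subst hd0 hd1
        rw [List.foldl_cons,
          show pvAStep (ret, ([] : List Char), ([] : List Char)) p = (ret, [], []) by
            simp [pvAStep, hne],
          show pvSpansA [] [] (p :: ps) = pvSpansA [] [] ps by simp [pvSpansA, hne]]
        exact ih _ _ _ (by simp)
      · rw [List.foldl_cons,
          show pvAStep (ret, d0, d1) p =
              (ret ++ [[String.ofList d0, String.ofList d1]], [], []) by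
            simp [pvAStep, hne, he],
          show pvSpansA d0 d1 (p :: ps) =
              [String.ofList d0, String.ofList d1] :: pvSpansA [] [] ps by
            simp [pvSpansA, hne, he],
          ih _ _ _ (by simp), List.append_assoc]
        rfl

lemma pvSpansA_eq_spansB (ps : List (Char × Char)) :
    ∀ (d0 d1 : List Char),
      (d0 = [] → pvSpansA [] [] ps = pvSpansB ps) ∧
      (d0 ≠ [] →
        pvSpansA d0 d1 ps =
          [String.ofList (d0 ++ (ps.takeWhile (fun q => q.1 != q.2)).map Prod.fst),
           String.ofList (d1 ++ (ps.takeWhile (fun q => q.1 != q.2)).map Prod.snd)] ::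
            pvSpansB (ps.dropWhile (fun q => q.1 != q.2))) := by
  induction ps with
  | nil =>
    intro d0 d1
    constructor
    · intro _; simp [pvSpansA, pvSpansB]
    · intro h; simp [pvSpansA, pvSpansB, List.isEmpty_iff, h]
  | cons p ps ih =>
    obtain ⟨c1, c2⟩ := p
    intro d0 d1
    by_cases hne : (c1 != c2) = true
    · have hb : (c1 == c2) = false := by simpa using hne
      have htw : List.takeWhile (fun q : Char × Char => q.1 != q.2) ((c1, c2) :: ps)
          = (c1, c2) :: List.takeWhile (fun q : Char × Char => q.1 != q.2) ps := by
        simp [hne]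
      have hdw : List.dropWhile (fun q : Char × Char => q.1 != q.2) ((c1, c2) :: ps)
          = List.dropWhile (fun q : Char × Char => q.1 != q.2) ps := by
        simp [hne]
      constructor
      · intro _
        have h2 := (ih [c1] [c2]).2 (by simp)
        rw [show pvSpansA [] [] ((c1, c2) :: ps) = pvSpansA [c1] [c2] ps by
          simp [pvSpansA, hne]]
        rw [h2]
        simp [pvSpansB, hb, htw, hdw]
      · intro hd0
        have h2 := (ih (d0 ++ [c1]) (d1 ++ [c2])).2 (by simp)
        rw [show pvSpansA d0 d1 ((c1, c2) :: ps) = pvSpansA (d0 ++ [c1]) (d1 ++ [c2]) ps by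
          simp [pvSpansA, hne]]
        rw [h2, htw, hdw]
        simp
    · have hb : (c1 == c2) = true := by simpa using hne
      have htw : List.takeWhile (fun q : Char × Char => q.1 != q.2) ((c1, c2) :: ps)
          = [] := by
        simp [hne]
      have hdw : List.dropWhile (fun q : Char × Char => q.1 != q.2) ((c1, c2) :: ps)
          = (c1, c2) :: ps := by
        simp [hne]
      constructor
      · intro _
        have h1 := (ih [] []).1 rfl
        simp [pvSpansA, hne, pvSpansB, hb, h1]
      · intro hd0
        have hde : ¬ d0.isEmpty = true := by simp [List.isEmpty_iff, hd0]
        have h1 := (ih [] []).1 rfl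
        rw [show pvSpansA d0 d1 ((c1, c2) :: ps) =
            [String.ofList d0, String.ofList d1] :: pvSpansA [] [] ps by
          simp [pvSpansA, hne, hde]]
        rw [h1, htw, hdw]
        simp [pvSpansB, hb]

-- ===== VERDICT (by name: the statement is the Claim_ definition above) =====
theorem get_diff_spans_spec : Claim_equal_get_diff_spans := by
  intro str1 str2 _
  unfold Spec_get_diff_spans get_diff_spans get_diff_spans_alt
  have h := pvFoldl_eq_spansA (List.zip str1.toList str2.toList) [] [] [] (by simp)
  have h2 := (pvSpansA_eq_spansB (List.zip str1.toList str2.toList) [] []).1 rfl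
  simpa [pvFinish, h2] using h
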